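-- pv_equiv track=rewrite | github.com/sachinrai3503/code | Python/list_count_inversions_of_size_3.py | count_size_3_inversion_1
-- ===== SOURCE A (Python) =====
-- def get_greater_num_count_to_left(ip_list, length, from_index, num):
--     count = 0
--     for i in range(from_index, -1, -1):
--         if ip_list[i] > num:
--             count += 1
--     return count
--
-- def get_smaller_num_count_to_right(ip_list, length, from_index, num):
--     count = 0
--     for i in range(from_index, length, 1):
--         if ip_list[i] < num:
--             count += 1
--     return count
--
-- def count_size_3_inversion_1(ip_list):
--     count = 0
--     length = len(ip_list)
--     for i in range(length):
--         greater_count = get_greater_num_count_to_left(ip_list, length,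
--                                                       i-1, ip_list[i])
--         smaller_count = get_smaller_num_count_to_right(ip_list, length,
--                                                        i+1, ip_list[i])
--         count += (greater_count*smaller_count)
--     return count
-- ===== SOURCE B (Python) =====
-- def count_size_3_inversion_1(ip_list):
--     # DP over length-2 decreasing subsequences: dp holds (value, number of
--     # earlier elements greater than value); each new element extends the
--     # length-2 counts of the greater values seen so far into triples.
--     total = 0
--     dp = []
--     for x in ip_list:
--         c = 0
--         for v, d in dp:
--             if v > x:
--                 c += 1
--                 total += d
--         dp.append((x, c))
--     return total
-- ===== Notes on version B (the rewrite author's own statement) =====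
-- stated objective: alternative
-- what changed: B counts length-3 decreasing subsequences with a one-pass DP that stores, for each element seen, the count of greater earlier elements and extends those pair counts into triples, instead of A's per-middle-element product of a greater-left scan and a smaller-right scan.
import Mathlib
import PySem

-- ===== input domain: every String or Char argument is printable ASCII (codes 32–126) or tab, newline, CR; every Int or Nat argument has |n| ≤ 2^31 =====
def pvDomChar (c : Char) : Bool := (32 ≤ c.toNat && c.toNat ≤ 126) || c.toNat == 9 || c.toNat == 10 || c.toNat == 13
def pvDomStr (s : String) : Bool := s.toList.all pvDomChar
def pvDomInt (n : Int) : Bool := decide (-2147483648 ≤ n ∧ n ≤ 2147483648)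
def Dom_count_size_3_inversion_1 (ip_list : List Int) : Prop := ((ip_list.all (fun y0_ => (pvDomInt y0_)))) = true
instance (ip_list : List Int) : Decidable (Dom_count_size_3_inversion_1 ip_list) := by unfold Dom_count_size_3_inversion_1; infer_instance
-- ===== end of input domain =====

-- B counts length-3 decreasing subsequences by a one-pass DP over decreasing-pair counts,
-- instead of A's per-middle-element product of a greater-left scan and a smaller-right scan.

-- ===== PORT A =====
-- ip_list[i] is only ever read at in-range indices here, so pyGetD with default 0 is exact.
def get_greater_num_count_to_left (ip_list : List Int) (_length : Int) (from_index : Int) (num : Int) : Int :=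
  (PySem.List.pyRange from_index (-1) (-1)).foldl
    (fun count i => if PySem.List.pyGetD ip_list i 0 > num then count + 1 else count) 0

def get_smaller_num_count_to_right (ip_list : List Int) (length : Int) (from_index : Int) (num : Int) : Int :=
  (PySem.List.pyRange from_index length 1).foldl
    (fun count i => if PySem.List.pyGetD ip_list i 0 < num then count + 1 else count) 0

def count_size_3_inversion_1 (ip_list : List Int) : Int :=
  let length : Int := PySem.List.len ip_list
  (PySem.List.pyRange 0 length 1).foldl
    (fun count i =>
      let greater_count := get_greater_num_count_to_left ip_list length (i - 1) (PySem.List.pyGetD ip_list i 0)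
      let smaller_count := get_smaller_num_count_to_right ip_list length (i + 1) (PySem.List.pyGetD ip_list i 0)
      count + greater_count * smaller_count) 0

-- ===== PORT B =====
-- state = (total, dp); dp is Source B's list of (value, count-of-greater-earlier-elements) pairs,
-- the inner loop threads (c, total) exactly as Source B's 'for v, d in dp' does
def count_size_3_inversion_1_alt (ip_list : List Int) : Int :=
  (ip_list.foldl
    (fun (st : Int × List (Int × Int)) x =>
      let s := st.2.foldl
        (fun (cs : Int × Int) vd => if vd.1 > x then (cs.1 + 1, cs.2 + vd.2) else cs) (0, st.1)
      (s.2, st.2 ++ [(x, s.1)]))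
    (0, [])).1

-- ===== PRECONDITION & SPEC =====
def Spec_count_size_3_inversion_1 (ip_list : List Int) (out : Int) : Prop := out = count_size_3_inversion_1_alt ip_list
instance (ip_list : List Int) (out : Int) : Decidable (Spec_count_size_3_inversion_1 ip_list out) := by unfold Spec_count_size_3_inversion_1; infer_instance

-- ===== CLAIM (what is proved, stated in full; the proofs are below) =====
def Claim_equal_count_size_3_inversion_1 : Prop := ∀ (ip_list : List Int), Dom_count_size_3_inversion_1 ip_list → Spec_count_size_3_inversion_1 ip_list (count_size_3_inversion_1 ip_list)

-- ===== LEMMAS AND PROOFS =====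

-- A's loop written as a sum over indices (proof-side abbreviation)
def pvSumA (xs : List Int) : Int :=
  ((List.range xs.length).map (fun k =>
      (((xs.take k).countP (fun a => xs.getD k 0 < a) : Nat) : Int)
        * (((xs.drop (k + 1)).countP (fun a => a < xs.getD k 0) : Nat) : Int))).sum

-- the dp list Source B maintains, described directly from the processed prefix
def pvDps (p : List Int) : List (Int × Int) :=
  (List.range p.length).map (fun j =>
    (p.getD j 0, (((p.take j).countP (fun a => p.getD j 0 < a) : Nat) : Int)))

-- counting over indices 0..k-1 equals countP over take k
theorem pv_countRange (xs : List Int) (q : Int → Bool) :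
    ∀ k : Nat, k ≤ xs.length →
      (List.range k).countP (fun j => q (xs.getD j 0)) = (xs.take k).countP q := by
  intro k
  induction k with
  | zero => simp
  | succ k ih =>
    intro hk
    rw [List.range_succ, List.countP_append, List.take_add_one, List.countP_append, ih (by omega)]
    have hlt : k < xs.length := by omega
    simp [List.getD, hlt]

-- characterisation of A's left helper
theorem pv_greater_eq (xs : List Int) (L : Int) (k : Nat) (hk : k ≤ xs.length) (x : Int) :
    get_greater_num_count_to_left xs L ((k : Int) - 1) x
      = (((xs.take k).countP (fun a => x < a) : Nat) : Int) := by
  unfold get_greater_num_count_to_left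
  rw [PySem.List.foldl_ite_add_one (fun i => PySem.List.pyGetD xs i 0 > x)]
  rw [PySem.List.pyRange_neg_one_eq_reverse]
  rw [List.countP_reverse, PySem.List.pyRange_one, List.countP_map]
  rw [show (-1 : Int) + 1 = 0 from by ring, show ((k : Int) - 1) + 1 = (k : Int) from by ring]
  rw [show ((k : Int) - 0).toNat = k from by omega]
  have hc : (List.range k).countP ((fun i => decide (PySem.List.pyGetD xs i 0 > x)) ∘ fun j => (0 : Int) + ↑j)
      = (List.range k).countP (fun j => decide (x < xs.getD j 0)) := by
    apply List.countP_congr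
    intro j _
    simp [Function.comp, PySem.List.pyGetD_of_nonneg]
  rw [hc, pv_countRange xs (fun a => decide (x < a)) k hk]
  simp

-- characterisation of A's right helper
theorem pv_smaller_eq (xs : List Int) (k : Nat) (x : Int) :
    get_smaller_num_count_to_right xs (PySem.List.len xs) ((k : Int) + 1) x
      = (((xs.drop (k + 1)).countP (fun a => a < x) : Nat) : Int) := by
  unfold get_smaller_num_count_to_right
  rw [PySem.List.foldl_pyRange_pyGetD xs 0 (fun acc v => if v < x then acc + 1 else acc) 0
      (by positivity)]
  rw [PySem.List.foldl_ite_add_one (fun v => v < x)]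
  have : ((k : Int) + 1).toNat = k + 1 := by omega
  rw [this]
  simp

-- A's whole loop equals pvSumA
theorem pv_A_sum (xs : List Int) : count_size_3_inversion_1 xs = pvSumA xs := by
  unfold count_size_3_inversion_1 pvSumA
  rw [PySem.List.foldl_add]
  rw [PySem.List.pyRange_one]
  have h0 : ((PySem.List.len xs) - 0).toNat = xs.length := by
    simp [PySem.List.len]
  rw [h0, List.map_map]
  rw [zero_add]
  congr 1
  apply List.map_congr_left
  intro k hk
  have hk' : k < xs.length := List.mem_range.mp hk
  simp only [Function.comp]
  rw [zero_add]
  have hx : PySem.List.pyGetD xs (k : Int) 0 = xs.getD k 0 := by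
    rw [PySem.List.pyGetD_of_nonneg xs 0 (by positivity)]; simp
  rw [hx, pv_greater_eq xs (PySem.List.len xs) k (le_of_lt hk') (xs.getD k 0),
      pv_smaller_eq xs k (xs.getD k 0)]

-- dp list after one more element
theorem pv_dps_append (p : List Int) (x : Int) :
    pvDps (p ++ [x]) = pvDps p ++ [(x, ((p.countP (fun a => x < a) : Nat) : Int))] := by
  unfold pvDps
  rw [List.length_append, List.length_singleton, List.range_succ, List.map_append]
  congr 1
  · apply List.map_congr_left
    intro j hj
    have hj' : j < p.length := List.mem_range.mp hj
    rw [List.getD_append _ _ _ _ hj', List.take_append_of_le_length (by omega)]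
  · rw [List.map_singleton]
    have hx : (p ++ [x]).getD p.length 0 = x := by
      simp [List.getD]
    rw [hx, List.take_append_of_le_length (le_refl _), List.take_length]

-- appending an element adds its extensions of earlier decreasing pairs
theorem pv_sumA_append (p : List Int) (x : Int) :
    pvSumA (p ++ [x])
      = pvSumA p + ((pvDps p).map (fun vd => if x < vd.1 then vd.2 else 0)).sum := by
  unfold pvSumA pvDps
  rw [List.length_append, List.length_singleton, List.range_succ, List.map_append, List.sum_append]
  have hlast : ((List.map (fun k =>
      ((((p ++ [x]).take k).countP (fun a => (p ++ [x]).getD k 0 < a) : Nat) : Int)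
        * ((((p ++ [x]).drop (k + 1)).countP (fun a => a < (p ++ [x]).getD k 0) : Nat) : Int)) [p.length])).sum = 0 := by
    rw [List.map_singleton]
    have hd : (p ++ [x]).drop (p.length + 1) = [] := by
      apply List.drop_eq_nil_of_le
      simp
    rw [hd]
    simp
  rw [hlast, add_zero]
  have hmap : (List.range p.length).map (fun k =>
      ((((p ++ [x]).take k).countP (fun a => (p ++ [x]).getD k 0 < a) : Nat) : Int)
        * ((((p ++ [x]).drop (k + 1)).countP (fun a => a < (p ++ [x]).getD k 0) : Nat) : Int))
      = (List.range p.length).map (fun k =>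
          (((p.take k).countP (fun a => p.getD k 0 < a) : Nat) : Int)
            * (((p.drop (k + 1)).countP (fun a => a < p.getD k 0) : Nat) : Int)
          + (if x < p.getD k 0 then (((p.take k).countP (fun a => p.getD k 0 < a) : Nat) : Int) else 0)) := by
    apply List.map_congr_left
    intro k hk
    have hk' : k < p.length := List.mem_range.mp hk
    rw [List.getD_append _ _ _ _ hk', List.take_append_of_le_length (by omega)]
    have hd : (p ++ [x]).drop (k + 1) = p.drop (k + 1) ++ [x] := by
      rw [List.drop_append_of_le_length (by omega)]
    rw [hd, List.countP_append]
    rw [List.countP_singleton]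
    push_cast
    simp only [decide_eq_true_eq]
    split_ifs with h <;> ring
  rw [hmap, PySem.List.sum_map_add_int, List.map_map]
  simp only [Function.comp_def]

-- Source B's inner loop over the dp list, characterised
theorem pv_scan (x : Int) (l : List (Int × Int)) :
    ∀ c t : Int,
      l.foldl (fun (cs : Int × Int) vd => if vd.1 > x then (cs.1 + 1, cs.2 + vd.2) else cs) (c, t)
        = (c + ((l.countP (fun vd => x < vd.1) : Nat) : Int),
           t + ((l.map (fun vd => if x < vd.1 then vd.2 else 0)).sum)) := by
  induction l with
  | nil => intro c t; simp
  | cons hd tl ih =>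
    intro c t
    rw [List.foldl_cons, List.countP_cons, List.map_cons, List.sum_cons]
    by_cases h : x < hd.1
    · rw [if_pos (show hd.1 > x from h), ih]
      simp only [h, decide_true, Prod.mk.injEq]
      refine ⟨by push_cast; ring, by simp only [if_true]; ring⟩
    · rw [if_neg (show ¬ hd.1 > x from h), ih]
      simp [h]

-- loop invariant for Source B's single pass: state = (answer so far, dp list of the prefix)
theorem pv_B_invariant (xs : List Int) :
    xs.foldl
      (fun (st : Int × List (Int × Int)) x =>
        let s := st.2.foldl
          (fun (cs : Int × Int) vd => if vd.1 > x then (cs.1 + 1, cs.2 + vd.2) else cs) (0, st.1)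
        (s.2, st.2 ++ [(x, s.1)]))
      (0, []) = (pvSumA xs, pvDps xs) := by
  induction xs using List.reverseRecOn with
  | nil => simp [pvSumA, pvDps]
  | append_singleton p x ih =>
    rw [List.foldl_append, ih, List.foldl_cons, List.foldl_nil]
    simp only []
    rw [pv_scan]
    have hcnt : (pvDps p).countP (fun vd => x < vd.1) = p.countP (fun a => x < a) := by
      unfold pvDps
      rw [List.countP_map]
      have : (List.range p.length).countP ((fun vd => decide (x < vd.1)) ∘ fun j =>
          (p.getD j 0, (((p.take j).countP (fun a => p.getD j 0 < a) : Nat) : Int)))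
          = (List.range p.length).countP (fun j => decide (x < p.getD j 0)) := by
        apply List.countP_congr
        intro j _
        simp [Function.comp]
      rw [this, pv_countRange p (fun a => decide (x < a)) p.length (le_refl _), List.take_length]
    rw [pv_sumA_append, pv_dps_append, hcnt]
    simp

-- ===== VERDICT (by name: the statement is the Claim_ definition above) =====
theorem count_size_3_inversion_1_spec : Claim_equal_count_size_3_inversion_1 := by
  intro ip_list _
  unfold Spec_count_size_3_inversion_1 count_size_3_inversion_1_alt
  rw [pv_B_invariant, pv_A_sum]
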